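-- pv_equiv track=rewrite | github.com/abermansam/AUTOCROSS | main.py | output_wordlist
-- ===== SOURCE A (Python) =====
-- def output_wordlist(grid):
--     across_words = []
--     down_words = []
--
--     # Find Across words
--     for row in range(len(grid)):
--         col = 0
--         while col < len(grid[0]):
--             if grid[row][col] != '#' and (col == 0 or grid[row][col - 1] == '#'):
--                 start_col = col
--                 word = ''
--                 while col < len(grid[0]) and grid[row][col] != '#':
--                     word += grid[row][col]
--                     col += 1
--                 if len(word) > 1:
--                     across_words.append((row + 1, start_col + 1, word))
--             else:
--                 col += 1
--
--     # Find Down words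
--     for col in range(len(grid[0])):
--         row = 0
--         while row < len(grid):
--             if grid[row][col] != '#' and (row == 0 or grid[row - 1][col] == '#'):
--                 start_row = row
--                 word = ''
--                 while row < len(grid) and grid[row][col] != '#':
--                     word += grid[row][col]
--                     row += 1
--                 if len(word) > 1:
--                     down_words.append((start_row + 1, col + 1, word))
--             else:
--                 row += 1
--
--     return {"Across": across_words, "Down": down_words}
-- ===== SOURCE B (Python) =====
-- def output_wordlist(grid):
--     width = len(grid[0])
--     rows = [line[:width] for line in grid]
--     cols = [[row[c] for row in rows] for c in range(width)]
--
--     def runs(cells):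
--         # Scan right-to-left, building the run list back-to-front: each non-'#'
--         # cell either extends the leftmost run found so far (when adjacent) or
--         # opens a new one.  out is kept reversed (out[-1] = leftmost run).
--         out = []
--         for i in range(len(cells) - 1, -1, -1):
--             if cells[i] != '#':
--                 if out and out[-1][0] == i + 1:
--                     out[-1] = (i, cells[i] + out[-1][1])
--                 else:
--                     out.append((i, cells[i]))
--         return out[::-1]
--
--     across = [(r + 1, s + 1, w) for r, row in enumerate(rows)
--               for s, w in runs(row) if len(w) > 1]
--     down = [(s + 1, c + 1, w) for c, col in enumerate(cols)
--             for s, w in runs(col) if len(w) > 1]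
--     return {"Across": across, "Down": down}
-- ===== Notes on version B (the rewrite author's own statement) =====
-- stated objective: alternative
-- what changed: B replaces A's left-to-right start-detect-then-inner-scan nested while loops by a single right-to-left pass per line (rows, then the transposed columns) that builds the run list back-to-front, merging each letter cell into the leftmost run found so far instead of ever looking for word starts.
import Mathlib
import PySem

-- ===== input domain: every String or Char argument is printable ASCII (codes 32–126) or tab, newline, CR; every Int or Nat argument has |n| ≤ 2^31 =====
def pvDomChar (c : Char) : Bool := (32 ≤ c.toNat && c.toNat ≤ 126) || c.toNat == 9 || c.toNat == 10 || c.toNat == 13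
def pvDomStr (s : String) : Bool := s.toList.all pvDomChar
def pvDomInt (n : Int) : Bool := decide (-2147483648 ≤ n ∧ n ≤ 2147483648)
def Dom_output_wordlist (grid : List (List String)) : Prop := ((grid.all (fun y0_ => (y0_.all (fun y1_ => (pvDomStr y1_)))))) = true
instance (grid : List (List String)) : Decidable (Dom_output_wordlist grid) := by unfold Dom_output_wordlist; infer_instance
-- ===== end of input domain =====

-- B replaces A's left-to-right start-detect-then-scan nested while-loops by a single
-- right-to-left pass per line that merges each letter cell into the leftmost run found
-- so far (building the run list back-to-front); objective: alternative decomposition.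

-- ===== PORT A =====
-- grid[row][col]; total via getD, exact inside Pre_ (indices in range there)
def pvCellA (g : List (List String)) (r c : Nat) : String := (g.getD r []).getD c ""

-- A's inner while (identical in both of A's loops up to which index moves):
-- scan the run from `col`, return (position after the run, concatenated word)
def gScan (cell : Nat → String) (n : Nat) (col : Nat) : Nat × String :=
  if _h1 : col < n then
    if cell col ≠ "#" then
      ((gScan cell n (col + 1)).1, cell col ++ (gScan cell n (col + 1)).2)
    else (col, "")
  else (col, "")
termination_by n - col

theorem gScan_fst_ge (cell : Nat → String) (n : Nat) : ∀ k col, n - col = k → col ≤ (gScan cell n col).1 := by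
  intro k
  induction k with
  | zero =>
    intro col hk
    have h1 : ¬ col < n := by omega
    rw [gScan, dif_neg h1]
  | succ m ih =>
    intro col hk
    by_cases h1 : col < n
    · by_cases h2 : cell col ≠ "#"
      · rw [gScan, dif_pos h1, if_pos h2]
        exact Nat.le_trans (Nat.le_succ col) (ih (col + 1) (by omega))
      · rw [gScan, dif_pos h1, if_neg h2]
    · rw [gScan, dif_neg h1]

theorem gScan_fst_gt (cell : Nat → String) (n col : Nat) (h1 : col < n) (h2 : cell col ≠ "#") :
    col < (gScan cell n col).1 := by
  rw [gScan, dif_pos h1, if_pos h2]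
  exact Nat.lt_of_lt_of_le (Nat.lt_succ_self col) (gScan_fst_ge cell n _ (col + 1) rfl)

-- A's outer while (both loops share this shape; `emit start word` builds the tuple)
def gLoop (cell : Nat → String) (n : Nat) (emit : Nat → String → Int × Int × String)
    (col : Nat) (acc : List (Int × Int × String)) : List (Int × Int × String) :=
  if h1 : col < n then
    if h2 : cell col ≠ "#" ∧ (col = 0 ∨ cell (col - 1) = "#") then
      gLoop cell n emit (gScan cell n col).1
        (if 1 < (gScan cell n col).2.length then acc ++ [emit col (gScan cell n col).2] else acc)
    else gLoop cell n emit (col + 1) acc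
  else acc
termination_by n - col
decreasing_by
  · have := gScan_fst_gt cell n col h1 h2.1
    omega
  · omega

def output_wordlist (grid : List (List String)) : List (String × List (Int × Int × String)) :=
  let w := (grid.getD 0 []).length
  let across := (List.range grid.length).foldl
      (fun acc r => gLoop (fun c => pvCellA grid r c) w
        (fun s wd => ((r : Int) + 1, (s : Int) + 1, wd)) 0 acc) []
  let down := (List.range w).foldl
      (fun acc c => gLoop (fun r => pvCellA grid r c) grid.length
        (fun s wd => ((s : Int) + 1, (c : Int) + 1, wd)) 0 acc) []
  [("Across", across), ("Down", down)]

-- ===== PORT B =====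
-- one step of B's right-to-left for-loop; `out` holds the runs in reverse order
-- (out[-1] is the leftmost run found so far)
def bStep (cells : List String) (out : List (Nat × String)) (i : Nat) : List (Nat × String) :=
  if cells.getD i "" ≠ "#" then
    match out.getLast? with
    | some p =>
      if p.1 = i + 1 then out.dropLast ++ [(i, cells.getD i "" ++ p.2)]
      else out ++ [(i, cells.getD i "")]
    | none => out ++ [(i, cells.getD i "")]
  else out

-- B's runs(cells): for i in range(len(cells)-1, -1, -1) … ; return out[::-1]
def bRuns (cells : List String) : List (Nat × String) :=
  ((List.range cells.length).reverse.foldl (bStep cells) []).reverse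

def output_wordlist_alt (grid : List (List String)) : List (String × List (Int × Int × String)) :=
  let w := (grid.getD 0 []).length
  let rows := grid.map (fun line => line.take w)
  let cols := (List.range w).map (fun c => rows.map (fun row => row.getD c ""))
  let across := (PySem.List.enumerate rows 0).flatMap (fun ri =>
    (bRuns ri.2).filterMap (fun p =>
      if 1 < p.2.length then some (ri.1 + 1, (p.1 : Int) + 1, p.2) else none))
  let down := (PySem.List.enumerate cols 0).flatMap (fun ci =>
    (bRuns ci.2).filterMap (fun p =>
      if 1 < p.2.length then some ((p.1 : Int) + 1, ci.1 + 1, p.2) else none))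
  [("Across", across), ("Down", down)]

-- ===== PRECONDITION & SPEC =====
-- A raises IndexError on the empty grid (len(grid[0])) and whenever some row is shorter
-- than row 0 (grid[row][col] for col < len(grid[0])); B raises on exactly the same inputs.
def Pre_output_wordlist (grid : List (List String)) : Prop :=
  grid ≠ [] ∧ ∀ row ∈ grid, (grid.headD []).length ≤ row.length
instance (grid : List (List String)) : Decidable (Pre_output_wordlist grid) := by
  unfold Pre_output_wordlist; infer_instance

def pvWitness_output_wordlist : List (List String) := [["a", "b"], ["#", "c"]]

def Spec_output_wordlist (grid : List (List String)) (out : List (String × List (Int × Int × String))) : Prop := out = output_wordlist_alt grid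
instance (grid : List (List String)) (out : List (String × List (Int × Int × String))) : Decidable (Spec_output_wordlist grid out) := by unfold Spec_output_wordlist; infer_instance

-- ===== CLAIM (what is proved, stated in full; the proofs are below) =====
def Claim_equal_output_wordlist : Prop := ∀ (grid : List (List String)), Dom_output_wordlist grid → Pre_output_wordlist grid → Spec_output_wordlist grid (output_wordlist grid)

-- ===== LEMMAS AND PROOFS =====

-- cons-side view of one B step (on the reversed accumulator)
def bMerge (i : Nat) (c : String) (acc : List (Nat × String)) : List (Nat × String) :=
  if c ≠ "#" then
    match acc with
    | p :: rest => if p.1 = i + 1 then (i, c ++ p.2) :: rest else (i, c) :: p :: rest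
    | [] => [(i, c)]
  else acc

-- runs of cells with absolute start positions, head-first (the value bRuns computes)
def aRuns : List String → Nat → List (Nat × String)
  | [], _ => []
  | c :: t, j => bMerge j c (aRuns t (j + 1))

theorem bStep_reverse (cells : List String) (out : List (Nat × String)) (i : Nat) :
    (bStep cells out i).reverse = bMerge i (cells.getD i "") out.reverse := by
  rcases List.eq_nil_or_concat out with h | ⟨ys, p, h⟩
  · subst h
    unfold bStep bMerge
    split_ifs <;> simp
  · subst h
    rw [List.concat_eq_append]
    unfold bStep bMerge
    rw [List.getLast?_concat, List.dropLast_concat]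
    by_cases hc : cells.getD i "" ≠ "#"
    · rw [if_pos hc, if_pos hc]
      by_cases hp : p.1 = i + 1
      · simp [hp]
      · simp [hp]
    · rw [if_neg hc, if_neg hc]

theorem foldl_bStep_reverse (cells : List String) :
    ∀ (idxs : List Nat) (out : List (Nat × String)),
      (idxs.foldl (bStep cells) out).reverse
        = idxs.foldl (fun r i => bMerge i (cells.getD i "") r) out.reverse := by
  intro idxs
  induction idxs with
  | nil => intro out; rfl
  | cons x t ih =>
    intro out
    simp only [List.foldl_cons]
    rw [ih, bStep_reverse]

theorem foldl_bMerge_range' (L : List String) :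
    ∀ k j, L.length - j = k →
      ((List.range' j k).reverse).foldl (fun r i => bMerge i (L.getD i "") r) []
        = aRuns (L.drop j) j := by
  intro k
  induction k with
  | zero =>
    intro j hk
    have : L.drop j = [] := List.drop_eq_nil_of_le (by omega)
    simp [this, aRuns]
  | succ m ih =>
    intro j hk
    have h1 : j < L.length := by omega
    have hdrop : L.drop j = L[j] :: L.drop (j + 1) := List.drop_eq_getElem_cons h1
    rw [List.range'_succ, List.reverse_cons', List.concat_eq_append, List.foldl_append]
    simp only [List.foldl_cons, List.foldl_nil]
    rw [ih (j + 1) (by omega), hdrop]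
    simp only [aRuns]
    rw [List.getD_eq_getElem L "" h1]

theorem bRuns_eq_aRuns (L : List String) : bRuns L = aRuns L 0 := by
  unfold bRuns
  rw [foldl_bStep_reverse, List.reverse_nil, List.range_eq_range',
    foldl_bMerge_range' L L.length 0 (by omega), List.drop_zero]

theorem bMerge_mem (i : Nat) (c : String) (acc : List (Nat × String)) (p : Nat × String)
    (hp : p ∈ bMerge i c acc) : p.1 = i ∨ p ∈ acc := by
  rcases acc with _ | ⟨q, rest⟩
  · simp only [bMerge] at hp
    split_ifs at hp
    · rw [List.mem_singleton] at hp
      left; rw [hp]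
    · simp at hp
  · simp only [bMerge] at hp
    split_ifs at hp with hc hq
    · rcases List.mem_cons.mp hp with h | h
      · left; rw [h]
      · right; exact List.mem_cons_of_mem q h
    · rcases List.mem_cons.mp hp with h | h
      · left; rw [h]
      · right; exact h
    · right; exact hp

theorem aRuns_ge (L : List String) : ∀ j p, p ∈ aRuns L j → j ≤ p.1 := by
  induction L with
  | nil => intro j p hp; simp [aRuns] at hp
  | cons c t ih =>
    intro j p hp
    rcases bMerge_mem j c (aRuns t (j + 1)) p hp with h | h
    · omega
    · have := ih (j + 1) p h
      omega

theorem aRuns_hash (t : List String) (j : Nat) : aRuns ("#" :: t) j = aRuns t (j + 1) := by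
  simp [aRuns, bMerge]

-- a nonempty '#'-free block followed by a '#' (or nothing) contributes exactly one run
theorem aRuns_run (r : List String) (hr : ∀ c ∈ r, c ≠ "#") (hne : r ≠ []) :
    ∀ (ys : List String), (ys = [] ∨ ys.head? = some "#") → ∀ j,
      aRuns (r ++ ys) j = (j, r.foldr (· ++ ·) "") :: aRuns ys (j + r.length) := by
  induction r with
  | nil => exact absurd rfl hne
  | cons c r' ih =>
    intro ys hys j
    have hc : c ≠ "#" := hr c (by simp)
    rcases eq_or_ne r' [] with h' | h'
    · subst h'
      rcases hys with h | h
      · subst h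
        simp [aRuns, bMerge, hc]
      · rcases ys with _ | ⟨y, ys'⟩
        · simp at h
        · have hy : y = "#" := by simpa using h
          subst hy
          rcases h2 : aRuns ys' (j + 1 + 1) with _ | ⟨q, rest⟩
          · simp [aRuns, h2, bMerge, hc]
          · have hq : j + 1 + 1 ≤ q.1 := aRuns_ge ys' (j + 1 + 1) q (by rw [h2]; simp)
            have hne1 : ¬ q.1 = j + 1 := by omega
            simp [aRuns, h2, bMerge, hc, hne1]
    · have hr' : ∀ x ∈ r', x ≠ "#" := fun x hx => hr x (List.mem_cons_of_mem c hx)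
      simp only [List.cons_append, aRuns]
      rw [ih hr' h' ys hys (j + 1)]
      have hlen : j + 1 + r'.length = j + (c :: r').length := by
        simp only [List.length_cons]
        omega
      simp only [bMerge, if_pos hc, List.foldr_cons, hlen]
      simp

-- the maximal run of non-'#' cells starting at position col
def runOf (L : List String) (col : Nat) : List String :=
  (L.drop col).takeWhile (fun c => c ≠ "#")

theorem gScan_eq (L : List String) : ∀ k col, L.length - col = k →
    gScan (fun c => L.getD c "") L.length col =
      (col + (runOf L col).length, (runOf L col).foldr (· ++ ·) "") := by
  intro k
  induction k with
  | zero =>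
    intro col hk
    have h1 : ¬ col < L.length := by omega
    have h2 : L.drop col = [] := List.drop_eq_nil_of_le (by omega)
    rw [gScan, dif_neg h1]
    simp [runOf, h2]
  | succ m ih =>
    intro col hk
    have h1 : col < L.length := by omega
    have hdrop : L.drop col = L[col] :: L.drop (col + 1) := List.drop_eq_getElem_cons h1
    have hgd : L.getD col "" = L[col] := List.getD_eq_getElem L "" h1
    have hq : L[col]? = some L[col] := List.getElem?_eq_getElem h1
    by_cases hc : L.getD col "" = "#"
    · have hc' : L[col] = "#" := by rw [← hgd]; exact hc
      rw [gScan, dif_pos h1, if_neg (not_not_intro hc)]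
      simp [runOf, hdrop, hc']
    · have hc' : ¬ L[col] = "#" := by rw [← hgd]; exact hc
      rw [gScan, dif_pos h1, if_pos hc, ih (col + 1) (by omega)]
      have hrun : runOf L col = L[col] :: runOf L (col + 1) := by
        simp only [runOf, hdrop, List.takeWhile_cons]
        rw [if_pos (by simp [hc'])]
      simp [hrun, List.getD, hq]
      omega

-- MAIN per-line lemma: A's while-loops over positions = filtered runs of aRuns
theorem main_line (L : List String) (emit2 : Nat → String → Int × Int × String) :
    ∀ k col, L.length - col = k →
    (col = 0 ∨ L.getD (col - 1) "" = "#") →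
    ∀ acc, gLoop (fun c => L.getD c "") L.length emit2 col acc =
      acc ++ (aRuns (L.drop col) col).filterMap
        (fun p => if 1 < p.2.length then some (emit2 p.1 p.2) else none) := by
  intro k
  induction k using Nat.strong_induction_on with
  | _ k ih =>
    intro col hk hfresh acc
    by_cases h1 : col < L.length
    · have hdrop : L.drop col = L[col] :: L.drop (col + 1) := List.drop_eq_getElem_cons h1
      have hgd : L.getD col "" = L[col] := List.getD_eq_getElem L "" h1
      by_cases hc : L[col] = "#"
      · have hcond : ¬ ((fun c => L.getD c "") col ≠ "#" ∧
            (col = 0 ∨ (fun c => L.getD c "") (col - 1) = "#")) := fun hAB => hAB.1 (hgd.trans hc)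
        rw [gLoop, dif_pos h1, dif_neg hcond]
        have hih := ih (L.length - (col + 1)) (by omega) (col + 1) rfl
          (Or.inr (by simpa using hgd.trans hc)) acc
        rw [hih, hdrop, hc, aRuns_hash]
      · have hcond : ((fun c => L.getD c "") col ≠ "#" ∧
            (col = 0 ∨ (fun c => L.getD c "") (col - 1) = "#")) := by
          exact ⟨fun h => hc (hgd.symm.trans h), hfresh⟩
        have hr_ne : ∀ c ∈ runOf L col, c ≠ "#" := by
          intro c hcmem
          have := List.mem_takeWhile_imp hcmem
          simpa using this
        have hrne : runOf L col ≠ [] := by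
          have : runOf L col = L[col] :: runOf L (col + 1) := by
            simp only [runOf, hdrop, List.takeWhile_cons]
            rw [if_pos (by simp [hc])]
          simp [this]
        have hsplit : runOf L col ++ (L.drop col).dropWhile (fun c => decide (c ≠ "#"))
            = L.drop col := List.takeWhile_append_dropWhile
        have hrest : (L.drop col).dropWhile (fun c => decide (c ≠ "#"))
            = L.drop (col + (runOf L col).length) := by
          conv_rhs => rw [← List.drop_drop, ← hsplit]
          rw [List.drop_left]
        have hscan := gScan_eq L (L.length - col) col rfl
        rw [gLoop, dif_pos h1, dif_pos hcond, hscan]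
        by_cases h2 : col + (runOf L col).length < L.length
        · have hdrop2 : L.drop (col + (runOf L col).length)
              = (L[col + (runOf L col).length]'h2) :: L.drop (col + (runOf L col).length + 1) :=
            List.drop_eq_getElem_cons h2
          have hd : (L[col + (runOf L col).length]'h2) = "#" := by
            have h0 : ((L.drop col).dropWhile (fun c => decide (c ≠ "#"))).head?
                = some (L[col + (runOf L col).length]'h2) := by
              rw [hrest, hdrop2]; rfl
            have hnot := List.head?_dropWhile_not (fun c => decide (c ≠ "#")) (L.drop col)
            rw [h0] at hnot
            simpa using hnot
          have hruns : aRuns (L.drop col) col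
              = (col, (runOf L col).foldr (· ++ ·) "")
                :: aRuns (L.drop (col + (runOf L col).length)) (col + (runOf L col).length) := by
            conv_lhs => rw [← hsplit, hrest]
            exact aRuns_run (runOf L col) hr_ne hrne _
              (Or.inr (by rw [hdrop2, hd]; rfl)) col
          have hgd2 : L.getD (col + (runOf L col).length) "" = "#" := by
            rw [List.getD_eq_getElem L "" h2, hd]
          have hcond2 : ¬ ((fun c => L.getD c "") (col + (runOf L col).length) ≠ "#" ∧
              (col + (runOf L col).length = 0 ∨
                (fun c => L.getD c "") (col + (runOf L col).length - 1) = "#")) :=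
            fun hAB => hAB.1 hgd2
          rw [gLoop, dif_pos h2, dif_neg hcond2]
          have hih := ih (L.length - (col + (runOf L col).length + 1)) (by omega)
            (col + (runOf L col).length + 1) rfl (Or.inr (by simpa using hgd2))
            (if 1 < ((runOf L col).foldr (· ++ ·) "").length
              then acc ++ [emit2 col ((runOf L col).foldr (· ++ ·) "")] else acc)
          rw [hih, hruns]
          rw [hdrop2, hd, aRuns_hash]
          simp only [List.filterMap_cons]
          split_ifs <;> simp
        · have hnil : L.drop (col + (runOf L col).length) = [] :=
            List.drop_eq_nil_of_le (by omega)
          have hruns : aRuns (L.drop col) col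
              = [(col, (runOf L col).foldr (· ++ ·) "")] := by
            conv_lhs => rw [← hsplit, hrest, hnil]
            rw [aRuns_run (runOf L col) hr_ne hrne [] (Or.inl rfl) col]
            simp [aRuns]
          rw [gLoop, dif_neg h2, hruns]
          simp only [List.filterMap_cons, List.filterMap_nil]
          split_ifs <;> simp
    · have hnil : L.drop col = [] := List.drop_eq_nil_of_le (by omega)
      rw [gLoop, dif_neg h1, hnil]
      simp [aRuns]

theorem gScan_congr (cell cell' : Nat → String) (n : Nat)
    (h : ∀ c < n, cell c = cell' c) : ∀ k col, n - col = k →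
    gScan cell n col = gScan cell' n col := by
  intro k
  induction k with
  | zero =>
    intro col hk
    have h1 : ¬ col < n := by omega
    rw [gScan, dif_neg h1, gScan, dif_neg h1]
  | succ m ih =>
    intro col hk
    by_cases h1 : col < n
    · conv_lhs => rw [gScan, dif_pos h1]
      conv_rhs => rw [gScan, dif_pos h1]
      rw [h col h1, ih (col + 1) (by omega)]
    · rw [gScan, dif_neg h1, gScan, dif_neg h1]

theorem gLoop_congr (cell cell' : Nat → String) (n : Nat)
    (emit : Nat → String → Int × Int × String)
    (h : ∀ c < n, cell c = cell' c) : ∀ k col, n - col ≤ k → ∀ acc,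
    gLoop cell n emit col acc = gLoop cell' n emit col acc := by
  intro k
  induction k with
  | zero =>
    intro col hk acc
    have h1 : ¬ col < n := by omega
    have e1 : gLoop cell n emit col acc = acc := by rw [gLoop, dif_neg h1]
    have e2 : gLoop cell' n emit col acc = acc := by rw [gLoop, dif_neg h1]
    rw [e1, e2]
  | succ m ih =>
    intro col hk acc
    by_cases h1 : col < n
    · have hcell : cell col = cell' col := h col h1
      have hprev : cell (col - 1) = cell' (col - 1) := h (col - 1) (by omega)
      by_cases h2 : cell' col ≠ "#" ∧ (col = 0 ∨ cell' (col - 1) = "#")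
      · have h2' : cell col ≠ "#" ∧ (col = 0 ∨ cell (col - 1) = "#") := by
          rw [hcell, hprev]; exact h2
        conv_lhs => rw [gLoop, dif_pos h1, dif_pos h2']
        conv_rhs => rw [gLoop, dif_pos h1, dif_pos h2]
        rw [gScan_congr cell cell' n h (n - col) col rfl]
        have hgt : col < (gScan cell' n col).1 :=
          gScan_fst_gt cell' n col h1 h2.1
        exact ih (gScan cell' n col).1 (by omega) _
      · have h2' : ¬ (cell col ≠ "#" ∧ (col = 0 ∨ cell (col - 1) = "#")) := by
          rw [hcell, hprev]; exact h2
        conv_lhs => rw [gLoop, dif_pos h1, dif_neg h2']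
        conv_rhs => rw [gLoop, dif_pos h1, dif_neg h2]
        exact ih (col + 1) (by omega) acc
    · rw [gLoop, dif_neg h1, gLoop, dif_neg h1]

theorem gLoop_acc (cell : Nat → String) (n : Nat) (emit : Nat → String → Int × Int × String) :
    ∀ k col, n - col ≤ k → ∀ acc,
      gLoop cell n emit col acc = acc ++ gLoop cell n emit col [] := by
  intro k
  induction k with
  | zero =>
    intro col hk acc
    have h1 : ¬ col < n := by omega
    have e1 : ∀ a : List (Int × Int × String), gLoop cell n emit col a = a := fun a => by
      rw [gLoop, dif_neg h1]
    rw [e1, e1]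
    simp
  | succ m ih =>
    intro col hk acc
    by_cases h1 : col < n
    · by_cases h2 : cell col ≠ "#" ∧ (col = 0 ∨ cell (col - 1) = "#")
      · have hgt : col < (gScan cell n col).1 := gScan_fst_gt cell n col h1 h2.1
        conv_lhs => rw [gLoop, dif_pos h1, dif_pos h2]
        conv_rhs => rw [gLoop, dif_pos h1, dif_pos h2]
        rw [ih (gScan cell n col).1 (by omega),
          ih (gScan cell n col).1 (by omega)
            (if 1 < (gScan cell n col).2.length then [] ++ [emit col (gScan cell n col).2] else [])]
        split_ifs <;> simp
      · conv_lhs => rw [gLoop, dif_pos h1, dif_neg h2]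
        conv_rhs => rw [gLoop, dif_pos h1, dif_neg h2]
        exact ih (col + 1) (by omega) acc
    · have h1' : ¬ col < n := h1
      have e1 : ∀ a : List (Int × Int × String), gLoop cell n emit col a = a := fun a => by
        rw [gLoop, dif_neg h1']
      rw [e1, e1]
      simp

theorem foldl_acc_flatMap (f : Nat → List (Int × Int × String) → List (Int × Int × String))
    (hf : ∀ r acc, f r acc = acc ++ f r []) :
    ∀ (ks : List Nat) (acc : List (Int × Int × String)),
      ks.foldl (fun a r => f r a) acc = acc ++ ks.flatMap (fun r => f r []) := by
  intro ks
  induction ks with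
  | nil => intro acc; simp
  | cons x t ih =>
    intro acc
    simp only [List.foldl_cons, List.flatMap_cons]
    rw [ih (f x acc), hf]
    simp

-- B's enumerate-comprehension = per-index flatMap over the index range
theorem enum_flatMap_eq (G : Int × List String → List (Int × Int × String))
    (F : Nat → List (Int × Int × String)) :
    ∀ (lines : List (List String)) (i : Nat),
      (∀ k, k < lines.length → G (((i + k : Nat) : Int), lines.getD k []) = F (i + k)) →
      (PySem.List.enumerate lines (i : Int)).flatMap G
        = (List.range' i lines.length).flatMap F := by
  intro lines
  induction lines with
  | nil => intro i h; simp [PySem.List.enumerate_nil]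
  | cons l t ih =>
    intro i h
    rw [PySem.List.enumerate_cons]
    simp only [List.flatMap_cons, List.length_cons, List.range'_succ]
    have h0 := h 0 (by simp)
    simp only [Nat.add_zero, List.getD_cons_zero] at h0
    rw [h0]
    congr 1
    have hcast : (i : Int) + 1 = ((i + 1 : Nat) : Int) := by push_cast; ring
    rw [hcast]
    apply ih
    intro k hk
    have h' := h (k + 1) (by simpa using hk)
    have e : i + (k + 1) = i + 1 + k := by omega
    rw [e, List.getD_cons_succ] at h'
    exact h'

theorem enum_flatMap_eq0 (G : Int × List String → List (Int × Int × String))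
    (F : Nat → List (Int × Int × String)) (lines : List (List String))
    (h : ∀ k, k < lines.length → G (((k : Nat) : Int), lines.getD k []) = F k) :
    (PySem.List.enumerate lines 0).flatMap G = (List.range' 0 lines.length).flatMap F := by
  have h2 := enum_flatMap_eq G F lines 0 (by intro k hk; simpa using h k hk)
  simpa using h2

theorem headD_eq_getD_zero (grid : List (List String)) : grid.headD [] = grid.getD 0 [] := by
  cases grid <;> rfl

-- bRuns on a whole line: A's while-loop pair started at position 0 = filtered bRuns
theorem key_line (L : List String) (e2 : Nat → String → Int × Int × String) :
    gLoop (fun c => L.getD c "") L.length e2 0 []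
      = (bRuns L).filterMap (fun p => if 1 < p.2.length then some (e2 p.1 p.2) else none) := by
  have h := main_line L e2 L.length 0 (by omega) (Or.inl rfl) []
  rw [List.drop_zero] at h
  rw [h, bRuns_eq_aRuns]
  simp

-- ===== VERDICT (by name: the statement is the Claim_ definition above) =====
theorem output_wordlist_spec : Claim_equal_output_wordlist := by
  intro grid _ hpre
  obtain ⟨hne, hrows⟩ := hpre
  rw [headD_eq_getD_zero] at hrows
  unfold Spec_output_wordlist output_wordlist output_wordlist_alt
  simp only []
  set w := (grid.getD 0 []).length with hw
  set n := grid.length with hn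
  set rows := grid.map (fun line => line.take w) with hrowsdef
  set cols := (List.range w).map (fun c => rows.map (fun row => row.getD c "")) with hcolsdef
  have hrlen : rows.length = n := by rw [hrowsdef, List.length_map, hn]
  have hmemk : ∀ k, k < n → grid.getD k [] ∈ grid := by
    intro k hk
    rw [List.getD_eq_getElem grid [] hk]
    exact List.getElem_mem hk
  have hwle : ∀ k, k < n → w ≤ (grid.getD k []).length := fun k hk => hrows _ (hmemk k hk)
  have hrowsk : ∀ k, k < n → rows.getD k [] = (grid.getD k []).take w := by
    intro k hk
    rw [hrowsdef, List.getD_eq_getElem _ [] (by simpa using hk), List.getElem_map,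
      List.getD_eq_getElem grid [] hk]
  have hlenk : ∀ k, k < n → ((grid.getD k []).take w).length = w := by
    intro k hk
    have := hwle k hk
    rw [List.length_take]
    omega
  have hcellk : ∀ k, k < n → ∀ c, c < w → ((grid.getD k []).take w).getD c "" = pvCellA grid k c := by
    intro k hk c hc
    have hcl : c < ((grid.getD k []).take w).length := by rw [hlenk k hk]; exact hc
    have hwk := hwle k hk
    rw [List.getD_eq_getElem _ "" hcl, List.getElem_take]
    unfold pvCellA
    rw [List.getD_eq_getElem _ "" (by omega : c < (grid.getD k []).length)]
  -- Across
  have hA : (List.range n).foldl (fun acc r => gLoop (fun c => pvCellA grid r c) w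
        (fun s wd => ((r : Int) + 1, (s : Int) + 1, wd)) 0 acc) []
      = (PySem.List.enumerate rows 0).flatMap (fun ri =>
          (bRuns ri.2).filterMap (fun p =>
            if 1 < p.2.length then some (ri.1 + 1, (p.1 : Int) + 1, p.2) else none)) := by
    have h1 : (List.range n).foldl (fun acc r => gLoop (fun c => pvCellA grid r c) w
          (fun s wd => ((r : Int) + 1, (s : Int) + 1, wd)) 0 acc) []
        = (List.range' 0 rows.length).flatMap (fun r => gLoop (fun c => pvCellA grid r c) w
            (fun s wd => ((r : Int) + 1, (s : Int) + 1, wd)) 0 []) := by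
      rw [foldl_acc_flatMap
        (fun r a => gLoop (fun c => pvCellA grid r c) w
          (fun s wd => ((r : Int) + 1, (s : Int) + 1, wd)) 0 a)
        (fun r acc => gLoop_acc (fun c => pvCellA grid r c) w
          (fun s wd => ((r : Int) + 1, (s : Int) + 1, wd)) w 0 (by omega) acc)]
      rw [hrlen, ← List.range_eq_range']
      simp
    have h2 : (PySem.List.enumerate rows 0).flatMap (fun ri =>
          (bRuns ri.2).filterMap (fun p =>
            if 1 < p.2.length then some (ri.1 + 1, (p.1 : Int) + 1, p.2) else none))
        = (List.range' 0 rows.length).flatMap (fun r => gLoop (fun c => pvCellA grid r c) w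
            (fun s wd => ((r : Int) + 1, (s : Int) + 1, wd)) 0 []) := by
      apply enum_flatMap_eq0
      intro k hk
      have hk' : k < n := by rw [← hrlen]; exact hk
      rw [hrowsk k hk']
      have hkey := key_line ((grid.getD k []).take w)
        (fun s wd => ((k : Int) + 1, (s : Int) + 1, wd))
      rw [hlenk k hk'] at hkey
      rw [gLoop_congr _ _ w _ (fun c hc => (hcellk k hk' c hc)) w 0 (by omega) []] at hkey
      exact hkey.symm
    exact h1.trans h2.symm
  -- Down
  have hD : (List.range w).foldl (fun acc c => gLoop (fun r => pvCellA grid r c) n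
        (fun s wd => ((s : Int) + 1, (c : Int) + 1, wd)) 0 acc) []
      = (PySem.List.enumerate cols 0).flatMap (fun ci =>
          (bRuns ci.2).filterMap (fun p =>
            if 1 < p.2.length then some ((p.1 : Int) + 1, ci.1 + 1, p.2) else none)) := by
    have hcl : cols.length = w := by simp [hcolsdef]
    have h1 : (List.range w).foldl (fun acc c => gLoop (fun r => pvCellA grid r c) n
          (fun s wd => ((s : Int) + 1, (c : Int) + 1, wd)) 0 acc) []
        = (List.range' 0 cols.length).flatMap (fun c => gLoop (fun r => pvCellA grid r c) n
            (fun s wd => ((s : Int) + 1, (c : Int) + 1, wd)) 0 []) := by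
      rw [foldl_acc_flatMap
        (fun c a => gLoop (fun r => pvCellA grid r c) n
          (fun s wd => ((s : Int) + 1, (c : Int) + 1, wd)) 0 a)
        (fun c acc => gLoop_acc (fun r => pvCellA grid r c) n
          (fun s wd => ((s : Int) + 1, (c : Int) + 1, wd)) n 0 (by omega) acc)]
      rw [hcl, ← List.range_eq_range']
      simp
    have h2 : (PySem.List.enumerate cols 0).flatMap (fun ci =>
          (bRuns ci.2).filterMap (fun p =>
            if 1 < p.2.length then some ((p.1 : Int) + 1, ci.1 + 1, p.2) else none))
        = (List.range' 0 cols.length).flatMap (fun c => gLoop (fun r => pvCellA grid r c) n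
            (fun s wd => ((s : Int) + 1, (c : Int) + 1, wd)) 0 []) := by
      apply enum_flatMap_eq0
      intro c hc
      have hc' : c < w := by rw [← hcl]; exact hc
      have hcolc : cols.getD c [] = rows.map (fun row => row.getD c "") := by
        rw [hcolsdef, List.getD_eq_getElem _ [] (by simpa using hc'), List.getElem_map,
          List.getElem_range]
      have hmlen : (rows.map (fun row => row.getD c "")).length = n := by
        rw [List.length_map, hrlen]
      have hmcell : ∀ r, r < n → (rows.map (fun row => row.getD c "")).getD r ""
          = pvCellA grid r c := by
        intro r hr
        rw [List.getD_eq_getElem _ "" (by rw [hmlen]; exact hr), List.getElem_map]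
        have hre : (rows[r]'(by rw [hrlen]; exact hr)) = (grid.getD r []).take w := by
          rw [← hrowsk r hr, List.getD_eq_getElem rows [] (by rw [hrlen]; exact hr)]
        rw [hre]
        exact hcellk r hr c hc'
      rw [hcolc]
      have hkey := key_line (rows.map (fun row => row.getD c ""))
        (fun s wd => ((s : Int) + 1, (c : Int) + 1, wd))
      rw [hmlen] at hkey
      rw [gLoop_congr _ _ n _ (fun r hr => hmcell r hr) n 0 (by omega) []] at hkey
      exact hkey.symm
    exact h1.trans h2.symm
  rw [hA, hD]
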